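-- pv_equiv track=rewrite | github.com/ivlera/python_dqe | 4_functions.py | last_words_sentence
-- ===== SOURCE A (Python) =====
-- def last_words_sentence(text):
--     '''
--     :param text: String object containing any amount of sentences
--     :return: Sentence that consists of last word of each sentence in input text
--     '''
--     list_from_text = text.split(' ')
--     sentence_last_words_list = []
--     for word in list_from_text:
--         if '.' in word:
--             dot_index = word.index('.')
--             sentence_last_words_list.append(word[:dot_index])
--     return ' '.join(sentence_last_words_list).capitalize()
-- ===== SOURCE B (Python) =====
-- def last_words_sentence(text):
--     '''
--     :param text: String object containing any amount of sentences
--     :return: Sentence that consists of last word of each sentence in input text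
--     '''
--     # Single character-level scan instead of split + index + slice:
--     # track the current token's pre-dot prefix and whether a dot was seen.
--     out = []
--     buf = []
--     seen_dot = False
--     for ch in text:
--         if ch == ' ':
--             if seen_dot:
--                 out.append(''.join(buf))
--             buf = []
--             seen_dot = False
--         elif ch == '.':
--             seen_dot = True
--         elif not seen_dot:
--             buf.append(ch)
--     if seen_dot:
--         out.append(''.join(buf))
--     return ' '.join(out).capitalize()
-- ===== Notes on version B (the rewrite author's own statement) =====
-- stated objective: alternative
-- what changed: Replaced the split-then-per-word-index-then-slice pipeline with a single character-level scan that maintains the current token's pre-dot prefix and a seen-dot flag, emitting at token boundaries.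
import Mathlib
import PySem

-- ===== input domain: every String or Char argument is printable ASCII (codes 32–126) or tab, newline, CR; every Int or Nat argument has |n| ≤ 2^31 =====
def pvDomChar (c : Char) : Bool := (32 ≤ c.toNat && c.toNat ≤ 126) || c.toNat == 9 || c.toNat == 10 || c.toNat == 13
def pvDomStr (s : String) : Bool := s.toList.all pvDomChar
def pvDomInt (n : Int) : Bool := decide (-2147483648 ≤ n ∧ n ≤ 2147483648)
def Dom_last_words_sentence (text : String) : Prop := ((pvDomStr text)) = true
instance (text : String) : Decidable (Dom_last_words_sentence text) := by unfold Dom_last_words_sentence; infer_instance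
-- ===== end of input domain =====

-- B replaces split(' ')+index('.')+slice with one character-level scan (alternative decomposition, same cost).
-- Both Pythons end with ' '.join(...).capitalize(); str.capitalize is ported by hand (exact on ASCII).

-- str.capitalize(): first char uppercased, the rest lowercased (exact on the ASCII domain)
def pyCapitalize : List Char → List Char
  | [] => []
  | c :: rest => PySem.Chars.upperChar c :: PySem.Chars.lower rest

-- ===== PORT A =====
def last_words_sentence (text : String) : String :=
  -- text.split(' ')  (sep is the non-empty literal ' ', so split? = some (splitOn …))
  let list_from_text := PySem.Chars.splitOn text.toList [' ']
  -- for word in …: if '.' in word: append word[:word.index('.')]  (index = find, guarded by the 'in' test)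
  let sentence_last_words_list := list_from_text.foldl
    (fun acc word =>
      if PySem.Chars.isIn ['.'] word then
        acc ++ [PySem.Chars.slice word none (some (PySem.Chars.find word ['.']))]
      else acc) []
  String.ofList (pyCapitalize (PySem.Chars.join [' '] sentence_last_words_list))

-- ===== PORT B =====
-- one loop step of Source B's scan: state = (out, buf, seen_dot)
def lwsStep (st : List (List Char) × List Char × Bool) (ch : Char) :
    List (List Char) × List Char × Bool :=
  if ch == ' ' then ((if st.2.2 then st.1 ++ [st.2.1] else st.1), [], false)
  else if ch == '.' then (st.1, st.2.1, true)
  else if st.2.2 then st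
  else (st.1, st.2.1 ++ [ch], false)

def last_words_sentence_alt (text : String) : String :=
  let st := text.toList.foldl lwsStep ([], [], false)
  let out := if st.2.2 then st.1 ++ [st.2.1] else st.1
  String.ofList (pyCapitalize (PySem.Chars.join [' '] out))

-- ===== PRECONDITION & SPEC =====
def Spec_last_words_sentence (text : String) (out : String) : Prop := out = last_words_sentence_alt text
instance (text : String) (out : String) : Decidable (Spec_last_words_sentence text out) := by unfold Spec_last_words_sentence; infer_instance

-- ===== CLAIM (what is proved, stated in full; the proofs are below) =====
def Claim_equal_last_words_sentence : Prop := ∀ (text : String), Dom_last_words_sentence text → Spec_last_words_sentence text (last_words_sentence text)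

-- ===== LEMMAS AND PROOFS =====

-- reference splitter on one separator char: (first token, remaining tokens)
def splitCp (c : Char) : List Char → List Char × List (List Char)
  | [] => ([], [])
  | x :: rest =>
      let p := splitCp c rest
      if x = c then ([], p.1 :: p.2) else (x :: p.1, p.2)

theorem splitOn_go_single (c : Char) :
    ∀ (fuel : Nat) (l cur : List Char) (acc : List (List Char)), l.length ≤ fuel →
      PySem.Chars.splitOn.go [c] fuel l cur acc =
        acc.reverse ++ (cur.reverse ++ (splitCp c l).1) :: (splitCp c l).2 := by
  intro fuel
  induction fuel with
  | zero =>
      intro l cur acc h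
      have : l = [] := List.eq_nil_of_length_eq_zero (Nat.le_zero.mp h)
      subst this
      simp [PySem.Chars.splitOn.go, splitCp]
  | succ n ih =>
      intro l cur acc h
      cases l with
      | nil => simp [PySem.Chars.splitOn.go, splitCp]
      | cons x rest =>
          rw [PySem.Chars.splitOn.go]
          by_cases hx : x = c
          · subst hx
            have hp : List.isPrefixOf [x] (x :: rest) = true := by
              simp [List.isPrefixOf]
            rw [if_pos hp]
            simp only [List.length_cons] at h
            rw [ih _ _ _ (by simp; omega)]
            simp [splitCp]
          · have hp : List.isPrefixOf [c] (x :: rest) = false := by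
              simp [List.isPrefixOf]; exact fun hh => absurd hh.symm hx
            rw [if_neg (by simp [hp])]
            simp only [List.length_cons] at h
            rw [ih _ _ _ (by omega)]
            simp [splitCp, hx]

theorem splitOn_single (cs : List Char) (c : Char) :
    PySem.Chars.splitOn cs [c] = (splitCp c cs).1 :: (splitCp c cs).2 := by
  rw [PySem.Chars.splitOn, splitOn_go_single c (cs.length + 1) cs [] [] (by omega)]
  simp


theorem take_first_dot : ∀ (w : List Char) (k : Nat),
    (∀ i, i < k → w[i]? ≠ some '.') → w[k]? = some '.' →
    w.take k = w.takeWhile (· ≠ '.') := by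
  intro w
  induction w with
  | nil => intro k _ hdot; simp at hdot
  | cons a rest ih =>
      intro k hkc hdot
      cases k with
      | zero =>
          simp at hdot
          simp [hdot]
      | succ m =>
          have ha : a ≠ '.' := by
            have := hkc 0 (by omega); simpa using this
          simp only [List.take_succ_cons, List.takeWhile_cons]
          rw [if_pos (by simp [ha])]
          rw [ih m (fun i hi => by have := hkc (i+1) (by omega); simpa using this)
              (by simpa using hdot)]

theorem slice_find_eq_takeWhile (w : List Char) (h : PySem.Chars.isIn ['.'] w = true) :
    PySem.Chars.slice w none (some (PySem.Chars.find w ['.'])) = w.takeWhile (· ≠ '.') := by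
  have hnn : 0 ≤ PySem.Chars.find w ['.'] :=
    (PySem.Chars.find_nonneg_iff w ['.']).mpr ((PySem.Chars.isIn_iff_infix ['.'] w).mp h)
  obtain ⟨hpre, hmin⟩ := PySem.Chars.find_spec (s := w) (sub := ['.']) hnn
  rw [PySem.Chars.slice_eq_listSlice, PySem.List.slice_to w hnn]
  apply take_first_dot
  · intro i hi hcontra
    refine hmin i hi ?_
    obtain ⟨hlt, hv⟩ := List.getElem?_eq_some_iff.mp hcontra
    exact ⟨List.drop (i+1) w, by rw [List.drop_eq_getElem_cons hlt]; simp [hv]⟩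
  · obtain ⟨t, ht⟩ := hpre
    have hd : List.drop (PySem.Chars.find w ['.']).toNat w = '.' :: t := by simpa using ht.symm
    have hlt : (PySem.Chars.find w ['.']).toNat < w.length := by
      by_contra hge
      rw [List.drop_eq_nil_of_le (by omega)] at hd
      simp at hd
    have := congrArg (·.head?) hd
    simpa [List.head?_drop] using this

def keptWords (ws : List (List Char)) : List (List Char) :=
  (ws.filter (fun w => PySem.Chars.isIn ['.'] w)).map (List.takeWhile (· ≠ '.'))

def procTok (buf : List Char) (seen : Bool) (w : List Char) : List (List Char) :=
  if seen then [buf]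
  else if PySem.Chars.isIn ['.'] w then [buf ++ w.takeWhile (· ≠ '.')] else []

theorem isIn_single_iff_mem (c : Char) (w : List Char) :
    PySem.Chars.isIn [c] w = true ↔ c ∈ w := by
  rw [PySem.Chars.isIn_iff_infix]
  constructor
  · rintro ⟨p, q, hw⟩; rw [← hw]; simp
  · intro hm
    obtain ⟨p, q, hw⟩ := List.append_of_mem hm
    exact ⟨p, q, by rw [hw]; simp⟩

theorem scan_eq : ∀ (cs : List Char) (out : List (List Char)) (buf : List Char) (seen : Bool),
    (let st := cs.foldl lwsStep (out, buf, seen);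
     if st.2.2 then st.1 ++ [st.2.1] else st.1) =
      out ++ procTok buf seen (splitCp ' ' cs).1 ++ keptWords (splitCp ' ' cs).2 := by
  intro cs
  induction cs with
  | nil =>
      intro out buf seen
      have hin0 : PySem.Chars.isIn ['.'] ([] : List Char) = false := by decide
      cases seen <;> simp [splitCp, procTok, keptWords, hin0]
  | cons x rest ih =>
      intro out buf seen
      by_cases hsp : x = ' '
      · subst hsp
        have hstep : lwsStep (out, buf, seen) ' ' =
            ((if seen then out ++ [buf] else out), [], false) := by
          simp [lwsStep]
        simp only [List.foldl_cons, hstep, splitCp]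
        rw [ih]
        have hin0 : PySem.Chars.isIn ['.'] ([] : List Char) = false := by decide
        cases seen <;>
          · simp [procTok, hin0, keptWords, List.filter_cons]
            split <;> simp
      · by_cases hdot : x = '.'
        · subst hdot
          have hstep : ∀ st : List (List Char) × List Char × Bool,
              lwsStep st '.' = (st.1, st.2.1, true) := by
            intro st; simp [lwsStep]
          simp only [List.foldl_cons, hstep]
          rw [ih]
          have h1 : PySem.Chars.isIn ['.'] ('.' :: (splitCp ' ' rest).1) = true := by
            rw [isIn_single_iff_mem]; simp
          cases seen <;> simp [splitCp, procTok, h1]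
        · cases seen
          · have hstep : lwsStep (out, buf, false) x = (out, buf ++ [x], false) := by
              simp [lwsStep, hsp, hdot]
            simp only [List.foldl_cons, hstep]
            rw [ih]
            have h2 : PySem.Chars.isIn ['.'] (x :: (splitCp ' ' rest).1) =
                PySem.Chars.isIn ['.'] (splitCp ' ' rest).1 := by
              rw [Bool.eq_iff_iff, isIn_single_iff_mem, isIn_single_iff_mem]
              simp [Ne.symm hdot]
            simp [splitCp, hsp, procTok, h2]
            split <;> simp [hdot]
          · have hstep : lwsStep (out, buf, true) x = (out, buf, true) := by
              simp [lwsStep, hsp, hdot]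
            simp only [List.foldl_cons, hstep]
            rw [ih]
            simp [splitCp, hsp, procTok]

theorem lws_eq (text : String) : last_words_sentence text = last_words_sentence_alt text := by
  simp only [last_words_sentence, last_words_sentence_alt]
  have hA : (PySem.Chars.splitOn text.toList [' ']).foldl
      (fun acc word =>
        if PySem.Chars.isIn ['.'] word then
          acc ++ [PySem.Chars.slice word none (some (PySem.Chars.find word ['.']))]
        else acc) [] = keptWords (PySem.Chars.splitOn text.toList [' ']) := by
    rw [PySem.List.foldl_append_if]
    unfold keptWords
    simp only [List.nil_append]
    apply List.map_congr_left
    intro w hw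
    exact slice_find_eq_takeWhile w (List.of_mem_filter hw)
  rw [hA]
  have hB := scan_eq text.toList [] [] false
  simp only at hB
  rw [hB]
  rw [splitOn_single]
  have : procTok [] false (splitCp ' ' text.toList).1 =
      keptWords [(splitCp ' ' text.toList).1] := by
    simp only [procTok, keptWords, List.filter_cons, Bool.false_eq_true, if_false]
    split <;> simp
  simp only [this, keptWords, List.filter_cons, List.nil_append]
  split <;> simp

-- ===== VERDICT (by name: the statement is the Claim_ definition above) =====
theorem last_words_sentence_spec : Claim_equal_last_words_sentence := by
  intro text _
  unfold Spec_last_words_sentence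
  exact lws_eq text
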